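-- pv_equiv track=rewrite | github.com/yashm-cerebras/SkyRL | skyagent/skyagent/tasks/swebench/utils.py | remove_binary_diffs
-- ===== SOURCE A (Python) =====
-- def remove_binary_diffs(patch_text):
--     """
--     Remove binary file diffs from a git patch.
--
--     Args:
--         patch_text (str): The git patch text
--
--     Returns:
--         str: The cleaned patch text with binary diffs removed
--     """
--     lines = patch_text.splitlines()
--     cleaned_lines = []
--     block = []
--     is_binary_block = False
--
--     for line in lines:
--         if line.startswith('diff --git '):
--             if block and not is_binary_block:
--                 cleaned_lines.extend(block)
--             block = [line]
--             is_binary_block = False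
--         elif 'Binary files' in line:
--             is_binary_block = True
--             block.append(line)
--         else:
--             block.append(line)
--
--     if block and not is_binary_block:
--         cleaned_lines.extend(block)
--     return '\n'.join(cleaned_lines)
-- ===== SOURCE B (Python) =====
-- def remove_binary_diffs(patch_text):
--     """Two-pass version: group lines into blocks, then filter and flatten."""
--     lines = patch_text.splitlines()
--     blocks = []
--     current = []
--     for line in lines:
--         if line.startswith('diff --git '):
--             blocks.append(current)
--             current = [line]
--         else:
--             current.append(line)
--     blocks.append(current)
--
--     def keep(block):
--         return bool(block) and not any(
--             'Binary files' in line
--             for line in block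
--             if not line.startswith('diff --git ')
--         )
--
--     return '\n'.join(line for block in blocks if keep(block) for line in block)
-- ===== Notes on version B (the rewrite author's own statement) =====
-- stated objective: alternative
-- what changed: Replaces A's single-pass scan that flushes the pending block and tracks a binary flag in mutable loop state by two separate passes: first group the lines into blocks (preamble plus one block per diff header line), then filter out blocks containing a non-header binary-marker line and flatten the rest.
import Mathlib
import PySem

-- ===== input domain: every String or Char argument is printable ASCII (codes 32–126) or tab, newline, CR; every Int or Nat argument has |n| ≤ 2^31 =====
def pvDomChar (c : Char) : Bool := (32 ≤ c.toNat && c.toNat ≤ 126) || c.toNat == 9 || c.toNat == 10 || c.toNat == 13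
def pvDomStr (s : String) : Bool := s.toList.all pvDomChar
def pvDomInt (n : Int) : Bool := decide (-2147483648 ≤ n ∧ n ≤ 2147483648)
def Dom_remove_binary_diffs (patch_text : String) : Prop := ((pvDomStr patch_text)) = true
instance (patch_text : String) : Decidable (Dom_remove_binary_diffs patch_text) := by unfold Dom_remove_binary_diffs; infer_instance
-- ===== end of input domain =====

-- B replaces A's single-pass flush-on-the-fly scan by two separate passes (group lines
-- into blocks, then filter the blocks and flatten); same return value, objective: alternative.

-- ===== PORT A =====
-- A's loop state: (cleaned_lines, block, is_binary_block)
def rbdAStep (st : List String × List String × Bool) (line : String) :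
    List String × List String × Bool :=
  if PySem.Str.startswith line "diff --git " then
    (st.1 ++ (if !st.2.1.isEmpty && !st.2.2 then st.2.1 else []), [line], false)
  else if PySem.Str.isIn "Binary files" line then
    (st.1, st.2.1 ++ [line], true)
  else
    (st.1, st.2.1 ++ [line], st.2.2)

def remove_binary_diffs (patch_text : String) : String :=
  let lines := PySem.Str.splitlines patch_text
  let s := lines.foldl rbdAStep ([], [], false)
  let cleaned := s.1 ++ (if !s.2.1.isEmpty && !s.2.2 then s.2.1 else [])
  PySem.Str.join "\n" cleaned

-- ===== PORT B =====
-- Source B's first pass: (blocks, current)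
def rbdBStep (st : List (List String) × List String) (line : String) :
    List (List String) × List String :=
  if PySem.Str.startswith line "diff --git " then (st.1 ++ [st.2], [line])
  else (st.1, st.2 ++ [line])

-- Source B's keep(block)
def rbdKeep (block : List String) : Bool :=
  !block.isEmpty &&
    !(block.any fun line =>
      !(PySem.Str.startswith line "diff --git ") && PySem.Str.isIn "Binary files" line)

def remove_binary_diffs_alt (patch_text : String) : String :=
  let lines := PySem.Str.splitlines patch_text
  let g := lines.foldl rbdBStep ([], [])
  let blocks := g.1 ++ [g.2]
  PySem.Str.join "\n" ((blocks.filter rbdKeep).flatten)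

-- ===== PRECONDITION & SPEC =====
def Spec_remove_binary_diffs (patch_text : String) (out : String) : Prop := out = remove_binary_diffs_alt patch_text
instance (patch_text : String) (out : String) : Decidable (Spec_remove_binary_diffs patch_text out) := by unfold Spec_remove_binary_diffs; infer_instance

-- ===== CLAIM (what is proved, stated in full; the proofs are below) =====
def Claim_equal_remove_binary_diffs : Prop := ∀ (patch_text : String), Dom_remove_binary_diffs patch_text → Spec_remove_binary_diffs patch_text (remove_binary_diffs patch_text)

-- ===== LEMMAS AND PROOFS =====

-- binP block : has the block a non-header 'Binary files' line? (invariant value of A's flag)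
def rbdBinP (block : List String) : Bool :=
  block.any fun line =>
    !(PySem.Str.startswith line "diff --git ") && PySem.Str.isIn "Binary files" line

lemma rbdKeep_eq (b : List String) : rbdKeep b = (!b.isEmpty && !rbdBinP b) := rfl

-- the blocks B's first pass produces starting from current = cur
def rbdGroups (cur : List String) : List String → List (List String)
  | [] => [cur]
  | l :: ls =>
    if PySem.Str.startswith l "diff --git " then cur :: rbdGroups [l] ls
    else rbdGroups (cur ++ [l]) ls

lemma rbdB_loop (ls : List String) : ∀ (bs : List (List String)) (cur : List String),
    (ls.foldl rbdBStep (bs, cur)).1 ++ [(ls.foldl rbdBStep (bs, cur)).2]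
      = bs ++ rbdGroups cur ls := by
  induction ls with
  | nil => intro bs cur; simp [rbdGroups]
  | cons l ls ih =>
    intro bs cur
    simp only [List.foldl_cons, rbdBStep, rbdGroups]
    split_ifs with h
    · rw [ih]; simp
    · rw [ih]

lemma rbdA_loop (ls : List String) : ∀ (cleaned block : List String),
    (let s := ls.foldl rbdAStep (cleaned, block, rbdBinP block)
     s.1 ++ (if !s.2.1.isEmpty && !s.2.2 then s.2.1 else []))
      = cleaned ++ ((rbdGroups block ls).filter rbdKeep).flatten := by
  induction ls with
  | nil =>
    intro cleaned block
    simp only [List.foldl_nil, rbdGroups, List.filter_cons, List.filter_nil, rbdKeep_eq]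
    cases hk : (!block.isEmpty && !rbdBinP block) <;> simp
  | cons l ls ih =>
    intro cleaned block
    simp only [List.foldl_cons, rbdAStep, rbdGroups]
    by_cases h1 : PySem.Str.startswith l "diff --git " = true
    · -- header line: flush, start a new block [l]
      have hbin : rbdBinP [l] = false := by
        simp only [rbdBinP, List.any_cons, List.any_nil, h1, Bool.not_true, Bool.false_and,
          Bool.or_false]
      have hih := ih (cleaned ++ (if !block.isEmpty && !rbdBinP block then block else [])) [l]
      rw [hbin] at hih
      simp only [h1, if_true]
      rw [hih, List.filter_cons, rbdKeep_eq]
      cases hk : (!block.isEmpty && !rbdBinP block) <;>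
        simp [List.append_assoc]
    · have h1' : PySem.Str.startswith l "diff --git " = false := by
        simpa using h1
      by_cases h2 : PySem.Str.isIn "Binary files" l = true
      · -- 'Binary files' content line: flag becomes true
        have hbin : rbdBinP (block ++ [l]) = true := by
          simp only [rbdBinP, List.any_append, List.any_cons, List.any_nil, h1', h2,
            Bool.not_false, Bool.true_and, Bool.or_true, Bool.or_false]
        have hih := ih cleaned (block ++ [l])
        rw [hbin] at hih
        simp only [h1', h2, Bool.false_eq_true, if_false, if_true]
        exact hih
      · -- ordinary line: flag unchanged
        have h2' : PySem.Str.isIn "Binary files" l = false := by simpa using h2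
        have hbin : rbdBinP (block ++ [l]) = rbdBinP block := by
          simp only [rbdBinP, List.any_append, List.any_cons, List.any_nil, h1', h2',
            Bool.not_false, Bool.and_false, Bool.or_false]
        have hih := ih cleaned (block ++ [l])
        rw [hbin] at hih
        simp only [h1', h2', Bool.false_eq_true, if_false]
        exact hih

-- ===== VERDICT (by name: the statement is the Claim_ definition above) =====
theorem remove_binary_diffs_spec : Claim_equal_remove_binary_diffs := by
  intro patch_text _
  show remove_binary_diffs patch_text = remove_binary_diffs_alt patch_text
  have hA := rbdA_loop (PySem.Str.splitlines patch_text) [] []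
  have hB := rbdB_loop (PySem.Str.splitlines patch_text) [] []
  rw [show rbdBinP ([] : List String) = false from rfl] at hA
  simp only [List.nil_append] at hA hB
  simp only [remove_binary_diffs, remove_binary_diffs_alt]
  rw [hA, hB]
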